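-- pv_equiv track=rewrite | github.com/boukeas/aoc-2023 | 13/solution13_02.py | find_single_discrepancy_axis
-- ===== SOURCE A (Python) =====
-- def reflection_discrepancies(numbers, length, axis):
--     """
--     Given a set of `numbers` (that represent # positions) and
--     the `length` of a line (the maximum possible number), return
--     the pairs of values that are *not* symmetric with respect to
--     the `axis` position, i.e. the discrepancies.
--
--     A pair of numbers is symmetric with respect to the `axis` position
--     if they are equidistant from the axis and they are *both* either
--     in the iterable of numbers or not.
--     """
--     discrepancies = set()
--     distance_from_axis = 0
--     while True:
--         left = axis - distance_from_axis - 1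
--         right = axis + distance_from_axis
--         if left < 0 or right == length:
--             return discrepancies
--         reflection = not ((left in numbers) ^ (right in numbers))
--         if not reflection:
--             discrepancies.add((left, right))
--         distance_from_axis += 1
--
-- def find_single_discrepancy_axis(lines, length):
--     """
--     Iterate over encoded `lines` (where the maximum value in each line may be
--     `length`) and return the set of single-discrepancy axes.
--
--     A single-discrepancy axis is an axis across which all `lines` *except one*
--     are symmetrical. The non-symmetrical line contains only a single
--     discrepancy with respect to the axis. In other words, fixing that single
--     discrepancy would make all lines symmetrical with respect to the axis.
--     """
--     # this set contains the axes that have <= 1 discrepancies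
--     # across the lines that have been examined thus far
--     candidates = set(range(1, length))
--     # this dict contains the axes that have exactly 1 discrepancy
--     # across the lines that have been examined thus far
--     single_discrepancy_candidates = {}
--     for index, line in enumerate(lines):
--         for axis in set(candidates):
--             discrepancies = reflection_discrepancies(line, length, axis)
--             nb_discrepancies = len(discrepancies)
--             if nb_discrepancies == 0:
--                 pass
--             elif len(discrepancies) == 1 and axis not in single_discrepancy_candidates:
--                 left, right = discrepancies.pop()
--                 # also take note which indices need to be flipped
--                 # to make the line symmetrical
--                 single_discrepancy_candidates[axis] = (left, right)
--             else:
--                 # remove axis from candidates: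
--                 # there is either a line with >1 discrepancies
--                 # or more than one lines with 1 discrepancy
--                 candidates.remove(axis)
--                 try:
--                     del single_discrepancy_candidates[axis]
--                 except KeyError:
--                     pass
--     return single_discrepancy_candidates
-- ===== SOURCE B (Python) =====
-- def discrepant_pairs(line, length, axis):
--     """Pairs of positions that break the symmetry of `line` about `axis`."""
--     return [(axis - d - 1, axis + d)
--             for d in range(min(axis, length - axis))
--             if ((axis - d - 1) in line) != ((axis + d) in line)]
--
--
-- def find_single_discrepancy_axis(lines, length):
--     """
--     For each line, find the axes across which that line has exactly one
--     asymmetric pair while every other line is fully symmetric; map each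
--     such axis to the pair that would have to be flipped.
--     """
--     result = {}
--     for index, line in enumerate(lines):
--         for axis in range(1, length):
--             pairs = discrepant_pairs(line, length, axis)
--             if len(pairs) == 1 and all(
--                     not discrepant_pairs(other, length, axis)
--                     for j, other in enumerate(lines) if j != index):
--                 result[axis] = pairs[0]
--     return result
-- ===== Notes on version B (the rewrite author's own statement) =====
-- stated objective: simpler
-- what changed: B drops A's incrementally pruned candidate set, hand-rolled while-loop symmetry scan and mid-iteration dict insertions/deletions, and instead checks the definition directly per (line, axis): a closed-form comprehension lists the asymmetric pairs of a line about an axis, and an axis is recorded when one line has exactly one such pair and all other lines have none.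
import Mathlib
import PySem

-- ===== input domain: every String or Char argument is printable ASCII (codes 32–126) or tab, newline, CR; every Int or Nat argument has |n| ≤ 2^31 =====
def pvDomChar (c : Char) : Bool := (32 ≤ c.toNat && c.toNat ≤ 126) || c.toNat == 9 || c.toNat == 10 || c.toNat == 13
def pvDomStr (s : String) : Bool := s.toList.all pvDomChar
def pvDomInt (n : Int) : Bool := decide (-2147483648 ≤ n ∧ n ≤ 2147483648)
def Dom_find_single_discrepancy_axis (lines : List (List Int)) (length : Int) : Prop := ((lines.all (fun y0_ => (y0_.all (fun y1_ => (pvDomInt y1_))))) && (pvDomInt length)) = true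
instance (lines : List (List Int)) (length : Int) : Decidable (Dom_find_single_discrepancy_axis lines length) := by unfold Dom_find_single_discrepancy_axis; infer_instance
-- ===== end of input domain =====

-- B replaces A's incrementally pruned candidate set, hand-rolled while-loop scan and
-- mid-iteration dict deletions by a stateless direct-from-spec check per (line, axis);
-- objective: simpler. The returned dict's insertion order in A depends on CPython's
-- set iteration order (not modelled; dict outputs are compared ignoring order): A's
-- port models the candidate set in insertion order.

-- ===== PORT A =====
-- while-loop of reflection_discrepancies; `if h :` only carries the loop guard for termination
def reflLoop (numbers : List Int) (length axis dist : Int) (discrepancies : PySem.Set (Int × Int)) : PySem.Set (Int × Int) :=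
  let left := axis - dist - 1
  let right := axis + dist
  if h : left < 0 ∨ right = length then discrepancies
  else
    let reflection := !(xor (numbers.contains left) (numbers.contains right))
    let discrepancies := if !reflection then PySem.Set.add discrepancies (left, right) else discrepancies
    reflLoop numbers length axis (dist + 1) discrepancies
termination_by (axis - dist).toNat
decreasing_by
  push Not at h
  omega

def reflection_discrepancies (numbers : List Int) (length axis : Int) : PySem.Set (Int × Int) :=
  reflLoop numbers length axis 0 PySem.Set.empty

-- body of `for axis in set(candidates)` for one line
def pvAxisStep (length : Int) (line : List Int)
    (st : PySem.Set Int × PySem.Dict Int (Int × Int)) (axis : Int) :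
    PySem.Set Int × PySem.Dict Int (Int × Int) :=
  let discrepancies := reflection_discrepancies line length axis
  let nb_discrepancies := PySem.Set.len discrepancies
  if nb_discrepancies = 0 then st
  else if PySem.Set.len discrepancies = 1 ∧ st.2.contains axis = false then
    -- discrepancies.pop(): the set is a singleton here, pop returns its element
    match discrepancies with
    | pair :: _ => (st.1, st.2.insert axis pair)
    | [] => st -- unreachable: len discrepancies = 1
  else
    -- candidates.remove(axis): axis always present (it comes from the snapshot,
    -- each axis once), so no KeyError; discard is exact. The guarded
    -- `del single_discrepancy_candidates[axis]` is exactly Dict.erase.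
    (PySem.Set.discard st.1 axis, st.2.erase axis)

def pvLineStep (length : Int) (st : PySem.Set Int × PySem.Dict Int (Int × Int)) (line : List Int) :
    PySem.Set Int × PySem.Dict Int (Int × Int) :=
  (PySem.Set.ofList st.1).foldl (pvAxisStep length line) st

def find_single_discrepancy_axis (lines : List (List Int)) (length : Int) : List (Int × Int × Int) :=
  let candidates : PySem.Set Int := PySem.Set.ofList (PySem.List.pyRange 1 length 1)
  let st := (PySem.List.enumerate lines 0).foldl (fun st p => pvLineStep length st p.2)
    (candidates, PySem.Dict.empty)
  st.2.items

-- ===== PORT B =====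
-- pairs of positions that break the symmetry of `line` about `axis`
def discrepant_pairs (line : List Int) (length axis : Int) : List (Int × Int) :=
  (PySem.List.pyRange 0 (min axis (length - axis)) 1).filterMap (fun d =>
    if (line.contains (axis - d - 1)) != (line.contains (axis + d)) then
      some (axis - d - 1, axis + d)
    else none)

def find_single_discrepancy_axis_alt (lines : List (List Int)) (length : Int) : List (Int × Int × Int) :=
  let result := (PySem.List.enumerate lines 0).foldl (fun result il =>
    (PySem.List.pyRange 1 length 1).foldl (fun result axis =>
      let pairs := discrepant_pairs il.2 length axis
      if pairs.length = 1 ∧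
          ((PySem.List.enumerate lines 0).filter (fun jo => decide (jo.1 ≠ il.1))).all
            (fun jo => (discrepant_pairs jo.2 length axis).isEmpty) then
        match pairs with
        | p :: _ => PySem.Dict.insert result axis p
        | [] => result -- unreachable: pairs.length = 1
      else result) result) PySem.Dict.empty
  result.items

-- ===== PRECONDITION & SPEC =====
def Spec_find_single_discrepancy_axis (lines : List (List Int)) (length : Int) (out : List (Int × Int × Int)) : Prop := out = find_single_discrepancy_axis_alt lines length
instance (lines : List (List Int)) (length : Int) (out : List (Int × Int × Int)) : Decidable (Spec_find_single_discrepancy_axis lines length out) := by unfold Spec_find_single_discrepancy_axis; infer_instance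

-- ===== CLAIM (what is proved, stated in full; the proofs are below) =====
def Claim_equal_find_single_discrepancy_axis : Prop := ∀ (lines : List (List Int)) (length : Int), Dom_find_single_discrepancy_axis lines length → Spec_find_single_discrepancy_axis lines length (find_single_discrepancy_axis lines length)

-- ===== LEMMAS AND PROOFS =====

-- one step of the symmetry scan at distance d
def pvStep (line : List Int) (axis d : Int) : Option (Int × Int) :=
  if (line.contains (axis - d - 1)) != (line.contains (axis + d)) then
    some (axis - d - 1, axis + d)
  else none

-- the discrepancy list of one line (closed form of reflection_discrepancies)
def pvDL (length axis : Int) (line : List Int) : List (Int × Int) :=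
  (List.range (min axis (length - axis)).toNat).filterMap (fun (k : Nat) => pvStep line axis (k : Int))

def pvCnt (length axis : Int) (line : List Int) : Nat := (pvDL length axis line).length

def pvTot (length axis : Int) (ls : List (List Int)) : Nat := (ls.map (pvCnt length axis)).sum

-- the dict A has built after processing the lines `ls` (grouped by discrepant line, then axis)
def pvDPart (length : Int) : List (List Int) → List (Int × Int × Int)
  | [] => []
  | l :: rest =>
      ((PySem.List.pyRange 1 length 1).filterMap (fun a =>
        if pvCnt length a l = 1 ∧ pvTot length a rest = 0 then
          (pvDL length a l).head?.map (fun p => (a, p))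
        else none))
      ++ (pvDPart length rest).filter (fun e => decide (pvCnt length e.1 l = 0))

-- the candidate list A keeps after processing `ls`
def pvCands (length : Int) (ls : List (List Int)) : List Int :=
  (PySem.List.pyRange 1 length 1).filter (fun a => decide (pvTot length a ls ≤ 1))

-- ---- reflection_discrepancies = pvDL ----
theorem pv_reflLoop_step (line : List Int) (length axis dist : Int)
    (hgo : ¬(axis - dist - 1 < 0 ∨ axis + dist = length)) (acc : PySem.Set (Int × Int)) :
    reflLoop line length axis dist acc =
      reflLoop line length axis (dist + 1)
        (match pvStep line axis dist with
         | some p => PySem.Set.add acc p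
         | none => acc) := by
  rw [reflLoop, dif_neg hgo]
  simp only [pvStep]
  cases hb1 : line.contains (axis - dist - 1) <;> cases hb2 : line.contains (axis + dist) <;>
    simp

theorem pv_range_succ_filterMap {α : Type} (f : Int → Option α) (dist : Int) (n : Nat) :
    (List.range (n + 1)).filterMap (fun (k : Nat) => f (dist + (k : Int))) =
      (f dist).toList ++ (List.range n).filterMap (fun (k : Nat) => f (dist + 1 + (k : Int))) := by
  rw [List.range_succ_eq_map, List.filterMap_cons, List.filterMap_map]
  have h2 : ((fun (k : Nat) => f (dist + (k : Int))) ∘ Nat.succ) =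
      (fun (k : Nat) => f (dist + 1 + (k : Int))) := by
    funext k
    simp only [Function.comp]
    congr 1
    push_cast
    ring
  rw [h2]
  cases hf : f (dist + ((0 : Nat) : Int)) <;>
    simp only [Nat.cast_zero, add_zero] at hf <;> simp [hf]

theorem pv_reflLoop_eq (line : List Int) (length axis : Int) (h1 : 1 ≤ axis) (h2 : axis < length) :
    ∀ (n : Nat) (dist : Int) (acc : List (Int × Int)),
      0 ≤ dist → dist + n = min axis (length - axis) →
      (∀ p ∈ acc, p.2 < axis + dist) →
      reflLoop line length axis dist acc =
        acc ++ (List.range n).filterMap (fun (k : Nat) => pvStep line axis (dist + (k : Int))) := by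
  intro n
  induction n with
  | zero =>
    intro dist acc h0 hsum _
    have hstop : axis - dist - 1 < 0 ∨ axis + dist = length := by omega
    rw [reflLoop, dif_pos hstop]
    simp
  | succ n ih =>
    intro dist acc h0 hsum hacc
    have hgo : ¬(axis - dist - 1 < 0 ∨ axis + dist = length) := by omega
    rw [pv_reflLoop_step line length axis dist hgo acc]
    rw [pv_range_succ_filterMap (pvStep line axis) dist n]
    cases hstep : pvStep line axis dist with
    | none =>
      simp only [Option.toList_none, List.nil_append]
      exact ih (dist + 1) acc (by omega) (by omega) (by intro p hp; have := hacc _ hp; omega)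
    | some p =>
      have hp : p = (axis - dist - 1, axis + dist) := by
        simp only [pvStep] at hstep
        by_cases hc : (line.contains (axis - dist - 1) != line.contains (axis + dist)) = true
        · rw [if_pos hc] at hstep; exact (Option.some_inj.mp hstep).symm
        · rw [if_neg hc] at hstep; cases hstep
      subst hp
      have hnm : (axis - dist - 1, axis + dist) ∉ acc := by
        intro hmem
        have := hacc _ hmem
        simp at this
      rw [show (match some ((axis - dist - 1, axis + dist) : Int × Int) with
          | some p => PySem.Set.add acc p
          | none => acc) = PySem.Set.add acc (axis - dist - 1, axis + dist) from rfl]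
      rw [show (PySem.Set.add acc (axis - dist - 1, axis + dist)) =
          acc ++ [(axis - dist - 1, axis + dist)] from PySem.Set.add_of_not_mem hnm]
      rw [ih (dist + 1) (acc ++ [(axis - dist - 1, axis + dist)]) (by omega) (by omega)
        (by
          intro p hp
          rcases List.mem_append.mp hp with h | h
          · have := hacc _ h; omega
          · simp at h; subst h; change (axis + dist : Int) < axis + (dist + 1); omega)]
      simp [List.append_assoc]

theorem pv_refl_eq (line : List Int) (length axis : Int) (h1 : 1 ≤ axis) (h2 : axis < length) :
    reflection_discrepancies line length axis = pvDL length axis line := by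
  have hmin : (0:Int) + ((min axis (length - axis)).toNat : Int) = min axis (length - axis) := by
    omega
  have := pv_reflLoop_eq line length axis h1 h2 (min axis (length - axis)).toNat 0 [] le_rfl hmin
    (by intro p hp; simp at hp)
  rw [reflection_discrepancies]
  rw [show (PySem.Set.empty : PySem.Set (Int × Int)) = ([] : List (Int × Int)) from rfl]
  rw [this]
  simp only [List.nil_append, pvDL]
  apply List.filterMap_congr
  intro k _
  norm_num

-- ---- facts about pvDPart ----
@[simp] theorem pvTot_nil (length a : Int) : pvTot length a [] = 0 := rfl

@[simp] theorem pvTot_cons (length a : Int) (l : List Int) (ls : List (List Int)) :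
    pvTot length a (l :: ls) = pvCnt length a l + pvTot length a ls := by
  simp [pvTot]

@[simp] theorem pvTot_append (length a : Int) (ls ms : List (List Int)) :
    pvTot length a (ls ++ ms) = pvTot length a ls + pvTot length a ms := by
  simp [pvTot]

theorem pv_block_mem {length : Int} {cond : Int → Prop} [DecidablePred cond]
    {g : Int → List (Int × Int)} {e : Int × Int × Int}
    (he : e ∈ (PySem.List.pyRange 1 length 1).filterMap (fun a =>
      if cond a then (g a).head?.map (fun p => (a, p)) else none)) :
    (1 ≤ e.1 ∧ e.1 < length) ∧ cond e.1 ∧ (g e.1).head? = some e.2 := by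
  rcases List.mem_filterMap.mp he with ⟨a, ha, hfa⟩
  by_cases hc : cond a
  · rw [if_pos hc] at hfa
    rcases Option.map_eq_some_iff.mp hfa with ⟨p, hp, hep⟩
    subst hep
    exact ⟨by simpa using PySem.List.mem_pyRange_one.mp ha, hc, hp⟩
  · rw [if_neg hc] at hfa; cases hfa

theorem pv_block_key_mem {length : Int} {cond : Int → Prop} [DecidablePred cond]
    {g : Int → List (Int × Int)} {a : Int} (h1 : 1 ≤ a) (h2 : a < length)
    (hc : cond a) (hg : (g a) ≠ []) :
    a ∈ ((PySem.List.pyRange 1 length 1).filterMap (fun a =>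
      if cond a then (g a).head?.map (fun p => (a, p)) else none)).map (fun e => e.1) := by
  rcases List.exists_mem_of_ne_nil (g a) hg with ⟨p0, _⟩
  rcases hh : (g a).head? with _ | p
  · rw [List.head?_eq_none_iff] at hh; exact absurd hh hg
  · exact List.mem_map.mpr ⟨(a, p), List.mem_filterMap.mpr
      ⟨a, PySem.List.mem_pyRange_one.mpr ⟨h1, h2⟩, by rw [if_pos hc, hh]; rfl⟩, rfl⟩

theorem pv_block_filter (length : Int) (cond : Int → Prop) [DecidablePred cond]
    (g : Int → List (Int × Int)) (q : Int → Prop) [DecidablePred q] :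
    ((PySem.List.pyRange 1 length 1).filterMap (fun a =>
        if cond a then (g a).head?.map (fun p => (a, p)) else none)).filter
        (fun e => decide (q e.1)) =
      (PySem.List.pyRange 1 length 1).filterMap (fun a =>
        if cond a ∧ q a then (g a).head?.map (fun p => (a, p)) else none) := by
  rw [List.filter_filterMap]
  apply List.filterMap_congr
  intro a _
  by_cases hc : cond a <;> by_cases hq : q a <;>
    cases hh : (g a).head? <;>
    simp [hc, hq, hh, Option.filter]

theorem pv_block_congr (length : Int) (c1 c2 : Int → Prop) [DecidablePred c1] [DecidablePred c2]
    (g : Int → List (Int × Int)) (h : ∀ a, c1 a ↔ c2 a) :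
    (PySem.List.pyRange 1 length 1).filterMap (fun a =>
        if c1 a then (g a).head?.map (fun p => (a, p)) else none) =
      (PySem.List.pyRange 1 length 1).filterMap (fun a =>
        if c2 a then (g a).head?.map (fun p => (a, p)) else none) := by
  apply List.filterMap_congr
  intro a _
  rw [if_congr (h a) rfl rfl]

theorem pv_dPart_entry (length : Int) (ls : List (List Int)) :
    ∀ e ∈ pvDPart length ls, (1 ≤ e.1 ∧ e.1 < length) ∧ pvTot length e.1 ls = 1 := by
  induction ls with
  | nil => intro e he; simp [pvDPart] at he
  | cons l rest ih =>
    intro e he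
    rcases List.mem_append.mp he with h | h
    · rcases pv_block_mem h with ⟨hb, ⟨hc, ht⟩, hh⟩
      refine ⟨hb, ?_⟩
      rw [pvTot_cons, hc, ht]
    · rcases List.mem_filter.mp h with ⟨hmem, hq⟩
      rcases ih e hmem with ⟨hb, ht⟩
      refine ⟨hb, ?_⟩
      rw [pvTot_cons, ht]
      simpa using hq

theorem pv_dPart_mem_key (length : Int) (ls : List (List Int)) (a : Int)
    (h1 : 1 ≤ a) (h2 : a < length) :
    a ∈ (pvDPart length ls).map (fun e => e.1) ↔ pvTot length a ls = 1 := by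
  induction ls with
  | nil => simp [pvDPart]
  | cons l rest ih =>
    rw [pvDPart, List.map_append, List.mem_append]
    constructor
    · rintro (h | h)
      · rcases List.mem_map.mp h with ⟨e, he, hea⟩
        rcases pv_block_mem he with ⟨_, ⟨hc, ht⟩, _⟩
        rw [hea] at hc ht
        rw [pvTot_cons, hc, ht]
      · rcases List.mem_map.mp h with ⟨e, he, hea⟩
        rcases List.mem_filter.mp he with ⟨hmem, hq⟩
        have := ih.mp (List.mem_map.mpr ⟨e, hmem, hea⟩)
        rw [hea] at hq
        simp at hq
        rw [pvTot_cons, this, hq]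
    · intro ht
      rw [pvTot_cons] at ht
      by_cases hc : pvCnt length a l = 1
      · left
        have hrest : pvTot length a rest = 0 := by omega
        refine pv_block_key_mem h1 h2 ⟨hc, hrest⟩ ?_
        intro hnil
        rw [pvCnt, hnil] at hc
        simp at hc
      · right
        have hc0 : pvCnt length a l = 0 := by omega
        have hrest : pvTot length a rest = 1 := by omega
        rcases List.mem_map.mp (ih.mpr hrest) with ⟨e, he, hea⟩
        exact List.mem_map.mpr ⟨e, List.mem_filter.mpr ⟨he, by rw [hea]; simpa using hc0⟩, hea⟩

theorem pv_dPart_snoc (length : Int) (ls : List (List Int)) (l : List Int) :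
    pvDPart length (ls ++ [l]) =
      (pvDPart length ls).filter (fun e => decide (pvCnt length e.1 l = 0))
      ++ (PySem.List.pyRange 1 length 1).filterMap (fun a =>
          if pvTot length a ls = 0 ∧ pvCnt length a l = 1 then
            (pvDL length a l).head?.map (fun p => (a, p))
          else none) := by
  induction ls with
  | nil =>
    rw [show ([] : List (List Int)) ++ [l] = [l] from rfl, pvDPart, pvDPart]
    simp only [pvDPart, List.filter_nil, List.append_nil, List.nil_append]
    apply pv_block_congr
    intro a
    constructor <;> rintro ⟨x, y⟩ <;> exact ⟨y, x⟩
  | cons p ps ih =>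
    rw [show (p :: ps) ++ [l] = p :: (ps ++ [l]) from rfl, pvDPart, pvDPart, ih]
    rw [List.filter_append, List.filter_append]
    rw [pv_block_filter length (fun a => pvCnt length a p = 1 ∧ pvTot length a ps = 0)
      (fun a => pvDL length a p) (fun a => pvCnt length a l = 0)]
    rw [pv_block_filter length (fun a => pvTot length a ps = 0 ∧ pvCnt length a l = 1)
      (fun a => pvDL length a l) (fun a => pvCnt length a p = 0)]
    rw [List.filter_comm]
    rw [pv_block_congr length _ (fun a => (pvCnt length a p = 1 ∧ pvTot length a (ps ++ [l]) = 0))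
      (fun a => pvDL length a p) (by intro a; simp only [pvTot_append, pvTot_cons, pvTot_nil]; all_goals omega)]
    rw [pv_block_congr length _ (fun a => (pvTot length a (p :: ps) = 0 ∧ pvCnt length a l = 1))
      (fun a => pvDL length a l) (by intro a; simp only [pvTot_cons]; omega)]
    simp only [List.append_assoc]
    congr 1
    apply pv_block_congr
    intro a
    simp only [pvTot_append, pvTot_cons, pvTot_nil]
    all_goals omega

-- ---- A: the inner loop over the candidate snapshot ----
theorem pv_mem_cands (length : Int) (pre : List (List Int)) (a : Int) :
    a ∈ pvCands length pre ↔ (1 ≤ a ∧ a < length) ∧ pvTot length a pre ≤ 1 := by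
  simp [pvCands, List.mem_filter, PySem.List.mem_pyRange_one]

theorem pv_contains_erase {κ ν : Type} [BEq κ] [LawfulBEq κ] (d : PySem.Dict κ ν) (k k' : κ)
    (h : k' ≠ k) : (d.erase k).contains k' = d.contains k' := by
  rcases d with ⟨items⟩
  simp only [PySem.Dict.erase, PySem.Dict.contains, List.any_filter]
  apply PySem.List.any_congr_mem
  intro x _
  by_cases hx : x.1 = k'
  · subst hx
    simp [h]
  · simp [hx]

theorem pv_inner_bad (length : Int) (pre : List (List Int)) (l : List Int) (a : Int)
    (s' : List Int) (c : List Int) (d : PySem.Dict Int (Int × Int))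
    (ih : ∀ (c : List Int) (d : PySem.Dict Int (Int × Int)),
      s'.Nodup →
      (∀ b ∈ s', (1 ≤ b ∧ b < length) ∧ pvTot length b pre ≤ 1) →
      (∀ b ∈ s', d.contains b = decide (pvTot length b pre = 1)) →
      (s'.foldl (pvAxisStep length l) (c, d)) =
      (c.filter (fun x => !decide (x ∈ s' ∧ 2 ≤ pvTot length x (pre ++ [l]))),
       PySem.Dict.mk ((d.items.filter (fun e => !decide (e.1 ∈ s' ∧ 2 ≤ pvTot length e.1 (pre ++ [l]))))
         ++ s'.filterMap (fun a =>
              if pvTot length a pre = 0 ∧ pvCnt length a l = 1 then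
                (pvDL length a l).head?.map (fun p => (a, p))
              else none))))
    (hnd' : s'.Nodup)
    (hs' : ∀ b ∈ s', (1 ≤ b ∧ b < length) ∧ pvTot length b pre ≤ 1)
    (hcon' : ∀ b ∈ s', d.contains b = decide (pvTot length b pre = 1))
    (hns : a ∉ s')
    (hb2 : 2 ≤ pvTot length a (pre ++ [l]))
    (hfa : ¬(pvTot length a pre = 0 ∧ pvCnt length a l = 1))
    (hred : pvAxisStep length l (c, d) a = (PySem.Set.discard c a, d.erase a)) :
    ((a :: s').foldl (pvAxisStep length l) (c, d)) =
      (c.filter (fun x => !decide (x ∈ a :: s' ∧ 2 ≤ pvTot length x (pre ++ [l]))),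
       PySem.Dict.mk ((d.items.filter (fun e => !decide (e.1 ∈ a :: s' ∧ 2 ≤ pvTot length e.1 (pre ++ [l]))))
         ++ (a :: s').filterMap (fun a =>
              if pvTot length a pre = 0 ∧ pvCnt length a l = 1 then
                (pvDL length a l).head?.map (fun p => (a, p))
              else none))) := by
  rw [List.foldl_cons, hred]
  rw [ih (PySem.Set.discard c a) (d.erase a) hnd' hs' (by
    intro b hb
    have hba : b ≠ a := fun he => hns (he ▸ hb)
    rw [pv_contains_erase d a b hba]
    exact hcon' b hb)]
  rw [Prod.mk.injEq]
  refine ⟨?_, ?_⟩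
  · rw [show (PySem.Set.discard c a) = c.filter (fun y => !(y == a)) from rfl]
    rw [List.filter_filter]
    apply List.filter_congr
    intro x _
    by_cases hx : x = a
    · subst hx
      have hb2' : 2 ≤ pvTot length x pre + pvCnt length x l := by simpa using hb2
      simp [hb2']
    · simp only [show (x == a) = false from beq_eq_false_iff_ne.mpr hx, Bool.not_false,
        Bool.true_and, Bool.and_true]
      apply congrArg Bool.not
      apply decide_eq_decide.mpr
      constructor
      · rintro ⟨h1, h2⟩; exact ⟨List.mem_cons_of_mem a h1, h2⟩
      · rintro ⟨h1, h2⟩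
        rcases List.mem_cons.mp h1 with rfl | h1
        · exact absurd rfl hx
        · exact ⟨h1, h2⟩
  · rw [List.filterMap_cons_none (by
      rw [if_neg hfa])]
    rw [show (d.erase a).items = d.items.filter (fun p => !(p.1 == a)) from rfl]
    rw [List.filter_filter]
    congr 2
    apply List.filter_congr
    intro e _
    by_cases hx : e.1 = a
    · have hb2' : 2 ≤ pvTot length a pre + pvCnt length a l := by simpa using hb2
      simp [hx, hb2']
    · simp only [show (e.1 == a) = false from beq_eq_false_iff_ne.mpr hx, Bool.not_false,
        Bool.true_and, Bool.and_true]
      apply congrArg Bool.not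
      apply decide_eq_decide.mpr
      constructor
      · rintro ⟨h1, h2⟩; exact ⟨List.mem_cons_of_mem a h1, h2⟩
      · rintro ⟨h1, h2⟩
        rcases List.mem_cons.mp h1 with he | h1
        · exact absurd he hx
        · exact ⟨h1, h2⟩

theorem pv_inner (length : Int) (pre : List (List Int)) (l : List Int) :
    ∀ (s : List Int) (c : List Int) (d : PySem.Dict Int (Int × Int)),
      s.Nodup →
      (∀ a ∈ s, (1 ≤ a ∧ a < length) ∧ pvTot length a pre ≤ 1) →
      (∀ a ∈ s, d.contains a = decide (pvTot length a pre = 1)) →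
      (s.foldl (pvAxisStep length l) (c, d)) =
      (c.filter (fun x => !decide (x ∈ s ∧ 2 ≤ pvTot length x (pre ++ [l]))),
       PySem.Dict.mk ((d.items.filter (fun e => !decide (e.1 ∈ s ∧ 2 ≤ pvTot length e.1 (pre ++ [l]))))
         ++ s.filterMap (fun a =>
              if pvTot length a pre = 0 ∧ pvCnt length a l = 1 then
                (pvDL length a l).head?.map (fun p => (a, p))
              else none))) := by
  intro s
  induction s with
  | nil =>
    intro c d _ _ _
    simp
  | cons a s' ih =>
    intro c d hnd hs hcon
    obtain ⟨⟨ha1, ha2⟩, hat⟩ := hs a List.mem_cons_self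
    have hcona := hcon a List.mem_cons_self
    have hns : a ∉ s' := (List.nodup_cons.mp hnd).1
    have hnd' := (List.nodup_cons.mp hnd).2
    have hs' : ∀ b ∈ s', (1 ≤ b ∧ b < length) ∧ pvTot length b pre ≤ 1 :=
      fun b hb => hs b (List.mem_cons_of_mem a hb)
    have hcon' : ∀ b ∈ s', d.contains b = decide (pvTot length b pre = 1) :=
      fun b hb => hcon b (List.mem_cons_of_mem a hb)
    have hlen : PySem.Set.len (pvDL length a l) = ((pvCnt length a l : Nat) : Int) := rfl
    have htot' : pvTot length a (pre ++ [l]) = pvTot length a pre + pvCnt length a l := by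
      simp
    by_cases h0 : pvCnt length a l = 0
    · -- zero discrepancies: state unchanged
      have hred : pvAxisStep length l (c, d) a = (c, d) := by
        simp only [pvAxisStep, pv_refl_eq l length a ha1 ha2]
        rw [hlen, if_pos (by exact_mod_cast congrArg (Nat.cast (R := Int)) h0)]
      rw [List.foldl_cons, hred, ih c d hnd' hs' hcon']
      have hnb : ¬ 2 ≤ pvTot length a (pre ++ [l]) := by omega
      rw [Prod.mk.injEq]
      refine ⟨?_, ?_⟩
      · apply List.filter_congr
        intro x _
        apply congrArg Bool.not
        apply decide_eq_decide.mpr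
        constructor
        · rintro ⟨hx, h2⟩; exact ⟨List.mem_cons_of_mem a hx, h2⟩
        · rintro ⟨hx, h2⟩
          rcases List.mem_cons.mp hx with rfl | hx
          · exact absurd h2 hnb
          · exact ⟨hx, h2⟩
      · rw [List.filterMap_cons_none (by rw [if_neg]; rintro ⟨-, hc⟩; omega)]
        congr 2
        apply List.filter_congr
        intro e _
        apply congrArg Bool.not
        apply decide_eq_decide.mpr
        constructor
        · rintro ⟨hx, h2⟩; exact ⟨List.mem_cons_of_mem a hx, h2⟩
        · rintro ⟨hx, h2⟩
          rcases List.mem_cons.mp hx with he | hx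
          · rw [he] at h2; exact absurd h2 hnb
          · exact ⟨hx, h2⟩
    · by_cases h1 : pvCnt length a l = 1
      · by_cases htz : pvTot length a pre = 0
        · -- insert branch
          have hcf : d.contains a = false := by rw [hcona, htz]; rfl
          obtain ⟨p, hp⟩ := List.length_eq_one_iff.mp h1
          have hred : pvAxisStep length l (c, d) a = (c, d.insert a p) := by
            simp only [pvAxisStep, pv_refl_eq l length a ha1 ha2]
            rw [hlen]
            rw [if_neg (by
              intro hc
              have : pvCnt length a l = 0 := by exact_mod_cast hc
              omega)]
            rw [if_pos ⟨by exact_mod_cast congrArg (Nat.cast (R := Int)) h1, hcf⟩]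
            rw [hp]
          have hnb : ¬ 2 ≤ pvTot length a (pre ++ [l]) := by omega
          have hitems : (d.insert a p).items = d.items ++ [(a, p)] :=
            PySem.Dict.items_insert_of_not_contains d p hcf
          rw [List.foldl_cons, hred, ih c (d.insert a p) hnd' hs' (by
            intro b hb
            have hba : b ≠ a := fun he => hns (he ▸ hb)
            rw [PySem.Dict.contains_insert]
            rw [show (b == a) = false from beq_eq_false_iff_ne.mpr hba]
            simp only [Bool.false_or]
            exact hcon' b hb)]
          rw [Prod.mk.injEq]
          refine ⟨?_, ?_⟩
          · apply List.filter_congr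
            intro x _
            apply congrArg Bool.not
            apply decide_eq_decide.mpr
            constructor
            · rintro ⟨hx, h2⟩; exact ⟨List.mem_cons_of_mem a hx, h2⟩
            · rintro ⟨hx, h2⟩
              rcases List.mem_cons.mp hx with rfl | hx
              · exact absurd h2 hnb
              · exact ⟨hx, h2⟩
          · rw [List.filterMap_cons_some (by
              rw [if_pos ⟨htz, h1⟩, hp]
              rfl)]
            rw [hitems, List.filter_append]
            rw [show ([(a, p)].filter (fun e =>
                !decide (e.1 ∈ s' ∧ 2 ≤ pvTot length e.1 (pre ++ [l])))) = [(a, p)] by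
              simp [hns]]
            rw [List.append_assoc, List.singleton_append]
            beta_reduce
            refine congrArg PySem.Dict.mk ?_
            refine congrArg₂ (α := List (Int × Int × Int)) (β := List (Int × Int × Int)) (· ++ ·) ?_ rfl
            apply List.filter_congr
            intro e _
            apply congrArg Bool.not
            apply decide_eq_decide.mpr
            constructor
            · rintro ⟨hx, h2⟩; exact ⟨List.mem_cons_of_mem a hx, h2⟩
            · rintro ⟨hx, h2⟩
              rcases List.mem_cons.mp hx with he | hx
              · rw [he] at h2; exact absurd h2 hnb
              · exact ⟨hx, h2⟩
        · -- one discrepancy but the axis already has one: remove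
          have htz1 : pvTot length a pre = 1 := by omega
          have hct : d.contains a = true := by rw [hcona, htz1]; rfl
          have hred : pvAxisStep length l (c, d) a =
              (PySem.Set.discard c a, d.erase a) := by
            simp only [pvAxisStep, pv_refl_eq l length a ha1 ha2]
            rw [hlen]
            rw [if_neg (by
              intro hc
              have : pvCnt length a l = 0 := by exact_mod_cast hc
              omega)]
            rw [if_neg (by rintro ⟨-, hcf⟩; rw [hct] at hcf; cases hcf)]
          exact pv_inner_bad length pre l a s' c d ih hnd' hs' hcon' hns
            (by simp only [pvTot_append, pvTot_cons, pvTot_nil]; omega)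
            (by rintro ⟨h', -⟩; omega) hred
      · -- at least two discrepancies: remove
        have hred : pvAxisStep length l (c, d) a =
            (PySem.Set.discard c a, d.erase a) := by
          simp only [pvAxisStep, pv_refl_eq l length a ha1 ha2]
          rw [hlen]
          rw [if_neg (by
            intro hc
            have : pvCnt length a l = 0 := by exact_mod_cast hc
            omega)]
          rw [if_neg (by
            rintro ⟨hcf, -⟩
            have : pvCnt length a l = 1 := by exact_mod_cast hcf
            omega)]
        exact pv_inner_bad length pre l a s' c d ih hnd' hs' hcon' hns
          (by simp only [pvTot_append, pvTot_cons, pvTot_nil]; omega)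
          (by rintro ⟨htz, hc⟩; omega) hred

theorem pv_stepLine (length : Int) (pre : List (List Int)) (l : List Int) :
    pvLineStep length (pvCands length pre, PySem.Dict.mk (pvDPart length pre)) l =
      (pvCands length (pre ++ [l]), PySem.Dict.mk (pvDPart length (pre ++ [l]))) := by
  have hnodup : (pvCands length pre).Nodup :=
    (PySem.List.nodup_pyRange_one 1 length).filter _
  simp only [pvLineStep]
  rw [PySem.Set.ofList_eq_self_of_nodup _ hnodup]
  rw [pv_inner length pre l (pvCands length pre) (pvCands length pre)
    (PySem.Dict.mk (pvDPart length pre)) hnodup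
    (fun a ha => (pv_mem_cands length pre a).mp ha)
    (by
      intro a ha
      obtain ⟨⟨h1, h2⟩, -⟩ := (pv_mem_cands length pre a).mp ha
      show (pvDPart length pre).any (fun p => p.1 == a) = decide (pvTot length a pre = 1)
      apply Bool.eq_iff_iff.mpr
      simp only [List.any_eq_true, beq_iff_eq, decide_eq_true_eq]
      rw [← pv_dPart_mem_key length pre a h1 h2]
      exact List.mem_map.symm)]
  rw [Prod.mk.injEq]
  refine ⟨?_, ?_⟩
  · have hre : pvCands length (pre ++ [l]) =
        (pvCands length pre).filter (fun a => decide (pvTot length a (pre ++ [l]) ≤ 1)) := by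
      rw [pvCands, pvCands, List.filter_filter]
      apply List.filter_congr
      intro a _
      apply Bool.eq_iff_iff.mpr
      simp only [decide_eq_true_eq, Bool.and_eq_true, pvTot_append, pvTot_cons, pvTot_nil]
      omega
    rw [hre]
    apply List.filter_congr
    intro a ha
    apply Bool.eq_iff_iff.mpr
    simp only [Bool.not_eq_true', decide_eq_false_iff_not, decide_eq_true_eq, ha, true_and,
      pvTot_append, pvTot_cons, pvTot_nil]
    omega
  · refine congrArg PySem.Dict.mk ?_
    rw [pv_dPart_snoc]
    refine congrArg₂ (· ++ ·) ?_ ?_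
    · apply List.filter_congr
      intro e he
      obtain ⟨⟨h1, h2⟩, ht1⟩ := pv_dPart_entry length pre e he
      apply Bool.eq_iff_iff.mpr
      simp only [Bool.not_eq_true', decide_eq_true_eq, decide_eq_false_iff_not,
        pv_mem_cands, pvTot_append, pvTot_cons, pvTot_nil, h1, h2, ht1, true_and]
      omega
    · rw [pvCands, List.filterMap_filter]
      apply List.filterMap_congr
      intro a _
      by_cases ht : pvTot length a pre ≤ 1
      · rw [if_pos (by simpa using ht)]
      · rw [if_neg (by simpa using ht)]
        rw [if_neg (by rintro ⟨hz, -⟩; omega)]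

theorem pv_enum_foldl {α β : Type} (f : β → α → β) :
    ∀ (xs : List α) (s : Int) (init : β),
      (PySem.List.enumerate xs s).foldl (fun st p => f st p.2) init = xs.foldl f init := by
  intro xs
  induction xs with
  | nil => intro s init; rfl
  | cons x xs ih =>
    intro s init
    rw [PySem.List.enumerate_cons, List.foldl_cons, List.foldl_cons]
    exact ih (s + 1) (f init x)

theorem pv_outer (length : Int) :
    ∀ (ls pre : List (List Int)),
      ls.foldl (pvLineStep length) (pvCands length pre, PySem.Dict.mk (pvDPart length pre)) =
        (pvCands length (pre ++ ls), PySem.Dict.mk (pvDPart length (pre ++ ls))) := by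
  intro ls
  induction ls with
  | nil => intro pre; simp
  | cons l ls' ih =>
    intro pre
    rw [List.foldl_cons, pv_stepLine length pre l, ih (pre ++ [l])]
    simp

theorem pv_A_eq (lines : List (List Int)) (length : Int) :
    find_single_discrepancy_axis lines length = pvDPart length lines := by
  simp only [find_single_discrepancy_axis]
  rw [pv_enum_foldl (pvLineStep length) lines 0]
  have h0 : (PySem.Set.ofList (PySem.List.pyRange 1 length 1) : PySem.Set Int) =
      pvCands length [] := by
    rw [PySem.Set.ofList_eq_self_of_nodup _ (PySem.List.nodup_pyRange_one 1 length)]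
    rw [pvCands]
    symm
    apply List.filter_eq_self.mpr
    intro a _
    simp
  rw [h0]
  rw [show (PySem.Dict.empty : PySem.Dict Int (Int × Int)) =
    PySem.Dict.mk (pvDPart length []) from rfl]
  rw [pv_outer length lines []]
  simp

-- ---- B side ----
theorem pv_contains_items {κ ν : Type} [BEq κ] (d : PySem.Dict κ ν) (k : κ) :
    d.contains k = d.items.any (fun p => p.1 == k) := rfl

-- discrepant_pairs is the same closed form pvDL
theorem pv_dp_eq (line : List Int) (length axis : Int) :
    discrepant_pairs line length axis = pvDL length axis line := by
  rw [discrepant_pairs, pvDL, PySem.List.pyRange_zero, List.filterMap_map]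
  apply List.filterMap_congr
  intro k _
  simp only [Function.comp, pvStep]

theorem pv_cnt_zero_iff (line : List Int) (length axis : Int) :
    (discrepant_pairs line length axis).isEmpty = true ↔ pvCnt length axis line = 0 := by
  rw [pv_dp_eq, List.isEmpty_iff, pvCnt, List.length_eq_zero_iff]

theorem pv_tot_zero_iff (length a : Int) (ls : List (List Int)) :
    pvTot length a ls = 0 ↔ ∀ x ∈ ls, pvCnt length a x = 0 := by
  induction ls with
  | nil => simp
  | cons l rest ih => simp [ih]

theorem pv_enum_idx {α : Type} :
    ∀ (xs : List α) (s : Int) (jo : Int × α), jo ∈ PySem.List.enumerate xs s →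
      s ≤ jo.1 ∧ jo.1 < s + xs.length := by
  intro xs
  induction xs with
  | nil => intro s jo h; cases h
  | cons x xs ih =>
    intro s jo h
    rw [PySem.List.enumerate_cons] at h
    rcases List.mem_cons.mp h with rfl | h
    · simp
    · have := ih (s + 1) jo h
      simp only [List.length_cons]
      push_cast
      push_cast at this
      omega

theorem pv_enum_snd_mem {α : Type} :
    ∀ (xs : List α) (s : Int) (x : α), x ∈ xs ↔ ∃ jo ∈ PySem.List.enumerate xs s, jo.2 = x := by
  intro xs s x
  constructor
  · intro hx
    have : x ∈ (PySem.List.enumerate xs s).map (fun p => p.2) := by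
      rw [show ((PySem.List.enumerate xs s).map (fun p => p.2)) = xs from
        PySem.List.map_snd_enumerate xs s]
      exact hx
    rcases List.mem_map.mp this with ⟨jo, hjo, hj2⟩
    exact ⟨jo, hjo, hj2⟩
  · rintro ⟨jo, hjo, rfl⟩
    have : jo.2 ∈ (PySem.List.enumerate xs s).map (fun p => p.2) :=
      List.mem_map.mpr ⟨jo, hjo, rfl⟩
    rwa [show ((PySem.List.enumerate xs s).map (fun p => p.2)) = xs from
      PySem.List.map_snd_enumerate xs s] at this

-- the `all(... for j, other in enumerate(lines) if j != index)` test, characterised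
theorem pv_cond_iff (length : Int) (pre : List (List Int)) (l : List Int)
    (rest : List (List Int)) (a : Int) :
    (((PySem.List.enumerate (pre ++ l :: rest) 0).filter
        (fun jo => decide (jo.1 ≠ ((pre.length : Nat) : Int)))).all
      (fun jo => (discrepant_pairs jo.2 length a).isEmpty)) = true ↔
    (pvTot length a pre = 0 ∧ pvTot length a rest = 0) := by
  have hsplit : PySem.List.enumerate (pre ++ l :: rest) 0 =
      PySem.List.enumerate pre 0 ++
        (((pre.length : Nat) : Int), l) :: PySem.List.enumerate rest (((pre.length : Nat) : Int) + 1) := by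
    rw [PySem.List.enumerate_append, PySem.List.enumerate_cons]
    norm_num
  rw [hsplit]
  rw [List.all_eq_true]
  constructor
  · intro h
    constructor
    · rw [pv_tot_zero_iff]
      intro x hx
      rcases (pv_enum_snd_mem pre 0 x).mp hx with ⟨jo, hjo, hj2⟩
      have hb := pv_enum_idx pre 0 jo hjo
      have hmem : jo ∈ List.filter (fun jo => decide (jo.1 ≠ ((pre.length : Nat) : Int)))
          (PySem.List.enumerate pre 0 ++
            (((pre.length : Nat) : Int), l) :: PySem.List.enumerate rest (((pre.length : Nat) : Int) + 1)) := by
        apply List.mem_filter.mpr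
        refine ⟨List.mem_append_left _ hjo, by simp; omega⟩
      have := h jo hmem
      rw [← hj2]
      exact (pv_cnt_zero_iff jo.2 length a).mp this
    · rw [pv_tot_zero_iff]
      intro x hx
      rcases (pv_enum_snd_mem rest (((pre.length : Nat) : Int) + 1) x).mp hx with ⟨jo, hjo, hj2⟩
      have hb := pv_enum_idx rest (((pre.length : Nat) : Int) + 1) jo hjo
      have hmem : jo ∈ List.filter (fun jo => decide (jo.1 ≠ ((pre.length : Nat) : Int)))
          (PySem.List.enumerate pre 0 ++
            (((pre.length : Nat) : Int), l) :: PySem.List.enumerate rest (((pre.length : Nat) : Int) + 1)) := by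
        apply List.mem_filter.mpr
        refine ⟨List.mem_append_right _ (List.mem_cons_of_mem _ hjo), by simp; omega⟩
      have := h jo hmem
      rw [← hj2]
      exact (pv_cnt_zero_iff jo.2 length a).mp this
  · rintro ⟨hpre, hrest⟩ jo hjo
    rcases List.mem_filter.mp hjo with ⟨hmem, hne⟩
    rcases List.mem_append.mp hmem with h | h
    · apply (pv_cnt_zero_iff jo.2 length a).mpr
      exact (pv_tot_zero_iff length a pre).mp hpre jo.2
        ((pv_enum_snd_mem pre 0 jo.2).mpr ⟨jo, h, rfl⟩)
    · rcases List.mem_cons.mp h with rfl | h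
      · simp at hne
      · apply (pv_cnt_zero_iff jo.2 length a).mpr
        exact (pv_tot_zero_iff length a rest).mp hrest jo.2
          ((pv_enum_snd_mem rest (((pre.length : Nat) : Int) + 1) jo.2).mpr ⟨jo, h, rfl⟩)

-- one line of B: folding the per-axis conditional insert appends the block of fresh entries
theorem pv_innerB (g : Int → List (Int × Int)) (P : Int → Prop) [DecidablePred P] :
    ∀ (axes : List Int) (d : PySem.Dict Int (Int × Int)),
      axes.Nodup →
      (∀ a ∈ axes, P a → d.contains a = false) →
      (axes.foldl (fun d a =>
        if P a then
          match g a with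
          | p :: _ => d.insert a p
          | [] => d
        else d) d).items =
      d.items ++ axes.filterMap (fun a =>
        if P a then (g a).head?.map (fun p => (a, p)) else none) := by
  intro axes
  induction axes with
  | nil => intro d _ _; simp
  | cons a axes ih =>
    intro d hnd hfresh
    have hnd' := (List.nodup_cons.mp hnd).2
    have hna : a ∉ axes := (List.nodup_cons.mp hnd).1
    rw [List.foldl_cons]
    by_cases hP : P a
    · rw [if_pos hP]
      cases hg : g a with
      | nil =>
        rw [List.filterMap_cons_none (by rw [if_pos hP, hg]; rfl)]
        exact ih d hnd' (fun b hb => hfresh b (List.mem_cons_of_mem a hb))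
      | cons p ps =>
        have hcf : d.contains a = false := hfresh a List.mem_cons_self hP
        have hitems : (d.insert a p).items = d.items ++ [(a, p)] :=
          PySem.Dict.items_insert_of_not_contains d p hcf
        rw [List.filterMap_cons_some (by rw [if_pos hP, hg]; rfl)]
        rw [ih (d.insert a p) hnd' (by
          intro b hb hPb
          rw [PySem.Dict.contains_insert,
            show (b == a) = false from beq_eq_false_iff_ne.mpr (fun he => hna (he ▸ hb))]
          simp only [Bool.false_or]
          exact hfresh b (List.mem_cons_of_mem a hb) hPb)]
        rw [hitems]
        simp
    · rw [if_neg hP, List.filterMap_cons_none (by rw [if_neg hP])]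
      exact ih d hnd' (fun b hb => hfresh b (List.mem_cons_of_mem a hb))

-- the outer fold of B, tracked against pvDPart of the remaining suffix
theorem pv_outerB (length : Int) (lines : List (List Int)) :
    ∀ (rest pre : List (List Int)) (d : PySem.Dict Int (Int × Int)),
      lines = pre ++ rest →
      (∀ e ∈ d.items, pvTot length e.1 rest = 0) →
      ((PySem.List.enumerate rest ((pre.length : Nat) : Int)).foldl (fun result il =>
        (PySem.List.pyRange 1 length 1).foldl (fun result axis =>
          let pairs := discrepant_pairs il.2 length axis
          if pairs.length = 1 ∧
              ((PySem.List.enumerate lines 0).filter (fun jo => decide (jo.1 ≠ il.1))).all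
                (fun jo => (discrepant_pairs jo.2 length axis).isEmpty) then
            match pairs with
            | p :: _ => PySem.Dict.insert result axis p
            | [] => result
          else result) result) d).items =
      d.items ++ (pvDPart length rest).filter (fun e => decide (pvTot length e.1 pre = 0)) := by
  intro rest
  induction rest with
  | nil =>
    intro pre d _ _
    simp [PySem.List.enumerate, pvDPart]
  | cons l rest ih =>
    intro pre d hlines hinv
    rw [PySem.List.enumerate_cons, List.foldl_cons]
    -- the condition at this line, characterised
    have hcond : ∀ a,
        ((discrepant_pairs l length a).length = 1 ∧
          ((PySem.List.enumerate lines 0).filter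
              (fun jo => decide (jo.1 ≠ ((pre.length : Nat) : Int)))).all
            (fun jo => (discrepant_pairs jo.2 length a).isEmpty) = true) ↔
        (pvCnt length a l = 1 ∧ (pvTot length a pre = 0 ∧ pvTot length a rest = 0)) := by
      intro a
      rw [hlines, pv_cond_iff length pre l rest a, pv_dp_eq]
      rfl
    -- inner fold: appends the fresh block for this line
    have hfresh : ∀ a ∈ PySem.List.pyRange 1 length 1,
        ((discrepant_pairs l length a).length = 1 ∧
          ((PySem.List.enumerate lines 0).filter
              (fun jo => decide (jo.1 ≠ ((pre.length : Nat) : Int)))).all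
            (fun jo => (discrepant_pairs jo.2 length a).isEmpty) = true) →
        d.contains a = false := by
      intro a _ hP
      rcases (hcond a).mp hP with ⟨h1, -, -⟩
      by_contra hc
      have hc' : d.contains a = true := by
        cases h : d.contains a
        · exact absurd h hc
        · rfl
      rw [pv_contains_items] at hc'
      rcases List.any_eq_true.mp hc' with ⟨e, he, hk⟩
      have := hinv e he
      rw [show e.1 = a from by simpa using hk] at this
      rw [pvTot_cons] at this
      omega
    have hinner := pv_innerB (fun a => discrepant_pairs l length a)
      (fun a => (discrepant_pairs l length a).length = 1 ∧
          ((PySem.List.enumerate lines 0).filter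
              (fun jo => decide (jo.1 ≠ ((pre.length : Nat) : Int)))).all
            (fun jo => (discrepant_pairs jo.2 length a).isEmpty) = true)
      (PySem.List.pyRange 1 length 1) d (PySem.List.nodup_pyRange_one 1 length) hfresh
    -- name the dict after the inner fold
    set d' := ((PySem.List.pyRange 1 length 1).foldl (fun result axis =>
          let pairs := discrepant_pairs l length axis
          if pairs.length = 1 ∧
              ((PySem.List.enumerate lines 0).filter
                  (fun jo => decide (jo.1 ≠ ((pre.length : Nat) : Int)))).all
                (fun jo => (discrepant_pairs jo.2 length axis).isEmpty) then
            match pairs with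
            | p :: _ => PySem.Dict.insert result axis p
            | [] => result
          else result) d) with hd'
    have hd'items : d'.items = d.items ++
        (PySem.List.pyRange 1 length 1).filterMap (fun a =>
          if pvCnt length a l = 1 ∧ (pvTot length a pre = 0 ∧ pvTot length a rest = 0) then
            (pvDL length a l).head?.map (fun p => (a, p))
          else none) := by
    -- rewrite the block's condition and its list via hcond / pv_dp_eq
      rw [hd', hinner]
      congr 1
      rw [pv_block_congr length _ _ (fun a => discrepant_pairs l length a) hcond]
      apply List.filterMap_congr
      intro a _
      rw [pv_dp_eq]
    -- apply the IH with pre ++ [l]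
    have hlines' : lines = (pre ++ [l]) ++ rest := by rw [hlines]; simp
    have hinv' : ∀ e ∈ d'.items, pvTot length e.1 rest = 0 := by
      intro e he
      rw [hd'items] at he
      rcases List.mem_append.mp he with h | h
      · have := hinv e h
        rw [pvTot_cons] at this
        omega
      · rcases pv_block_mem h with ⟨-, ⟨-, -, hr⟩, -⟩
        exact hr
    have hstart : (((pre ++ [l]).length : Nat) : Int) = ((pre.length : Nat) : Int) + 1 := by
      simp
    have := ih (pre ++ [l]) d' hlines' hinv'
    rw [hstart] at this
    rw [this, hd'items]
    rw [List.append_assoc]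
    congr 1
    -- algebra on the blocks and filters
    rw [pvDPart, List.filter_append]
    congr 1
    · rw [pv_block_filter length (fun a => pvCnt length a l = 1 ∧ pvTot length a rest = 0)
        (fun a => pvDL length a l) (fun a => pvTot length a pre = 0)]
      apply pv_block_congr
      intro a
      constructor
      · rintro ⟨h1, h2, h3⟩; exact ⟨⟨h1, h3⟩, h2⟩
      · rintro ⟨⟨h1, h3⟩, h2⟩; exact ⟨h1, h2, h3⟩
    · rw [List.filter_filter]
      apply List.filter_congr
      intro e _
      apply Bool.eq_iff_iff.mpr
      simp only [Bool.and_eq_true, decide_eq_true_eq, pvTot_append, pvTot_cons, pvTot_nil]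
      omega

theorem pv_B_eq (lines : List (List Int)) (length : Int) :
    find_single_discrepancy_axis_alt lines length = pvDPart length lines := by
  simp only [find_single_discrepancy_axis_alt]
  have h := pv_outerB length lines lines [] PySem.Dict.empty (by simp)
    (by intro e he; cases he)
  rw [show ((((List.nil : List (List Int)).length : Nat)) : Int) = 0 from rfl] at h
  rw [h]
  rw [show (PySem.Dict.empty : PySem.Dict Int (Int × Int)).items = [] from rfl, List.nil_append]
  apply List.filter_eq_self.mpr
  intro e _
  simp

-- ===== VERDICT (by name: the statement is the Claim_ definition above) =====
theorem find_single_discrepancy_axis_spec : Claim_equal_find_single_discrepancy_axis := by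
  intro lines length _
  unfold Spec_find_single_discrepancy_axis
  rw [pv_A_eq, pv_B_eq]
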